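-- pv_equiv track=rewrite | github.com/abhirazz123/JAVA | Assignment/bin/Day_5/Untitled-1.py | max_planks
-- ===== SOURCE A (Python) =====
-- def max_planks(wood):
--     #
--     freq = {}
--     for piece in wood:
--         freq[piece] = freq.get(piece, 0) + 1
--
--     max_planks = 0
--
--
--     for plank_length in freq.keys():
--
--         current_planks = freq.get(plank_length, 0)
--
--
--         for piece in freq.keys():
--
--             complement = plank_length - piece
--             if complement in freq and complement != piece:
--                 pair_planks = min(freq[piece], freq[complement])
--                 current_planks += pair_planks // 2
--
--
--         max_planks = max(max_planks, current_planks)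
--
--     return max_planks
-- ===== SOURCE B (Python) =====
-- def max_planks(wood):
--     freq = {}
--     for piece in wood:
--         freq[piece] = freq.get(piece, 0) + 1
--     keys = sorted(freq)
--     best = 0
--     for t in keys:
--         total = freq[t]
--         i, j = 0, len(keys) - 1
--         while i < j:
--             s = keys[i] + keys[j]
--             if s < t:
--                 i += 1
--             elif s > t:
--                 j -= 1
--             else:
--                 total += 2 * (min(freq[keys[i]], freq[keys[j]]) // 2)
--                 i += 1
--                 j -= 1
--         best = max(best, total)
--     return best
-- ===== Notes on version B (the rewrite author's own statement) =====
-- stated objective: alternative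
-- what changed: A is a hash-style gather: for each target key it rescans every key, looks up the complement t-p in the dict and adds min//2 once per direction; B sorts the distinct lengths once and, for each target, runs the classic two-pointer sweep from both ends of the sorted list, finding each complementary pair exactly once and adding its doubled even part 2*(min//2).
import Mathlib
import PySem

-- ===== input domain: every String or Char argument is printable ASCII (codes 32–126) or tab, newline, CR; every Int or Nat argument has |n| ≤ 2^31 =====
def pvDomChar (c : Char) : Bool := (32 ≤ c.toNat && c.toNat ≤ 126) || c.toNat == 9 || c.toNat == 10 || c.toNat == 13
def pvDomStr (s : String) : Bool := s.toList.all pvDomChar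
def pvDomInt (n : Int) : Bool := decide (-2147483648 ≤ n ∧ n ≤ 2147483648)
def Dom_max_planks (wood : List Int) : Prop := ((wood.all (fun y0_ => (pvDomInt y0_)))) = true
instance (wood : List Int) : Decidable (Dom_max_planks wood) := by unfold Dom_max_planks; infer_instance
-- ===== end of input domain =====

-- B replaces A's per-target complement lookups in the dict by sorting the distinct
-- lengths once and running a two-pointer sweep per target; objective: alternative
-- algorithm, same exact values.

-- ===== PORT A =====
def max_planks (wood : List Int) : Int :=
  let freq := wood.foldl (fun d piece => d.insert piece (d.getD piece 0 + 1)) PySem.Dict.empty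
  freq.keys.foldl (fun mp plank_length =>
    max mp (freq.keys.foldl (fun cur piece =>
      if freq.contains (plank_length - piece) && ((plank_length - piece) != piece) then
        cur + PySem.Int.floordiv
          (min (freq.getD piece 0) (freq.getD (plank_length - piece) 0)) 2
      else cur) (freq.getD plank_length 0))) 0

-- ===== PORT B =====
-- the inner 'while i < j' loop of Source B; keys[i] is ported as keys.getD i 0,
-- exact because i and j stay inside [0, len keys) whenever the loop body runs
def pvTwoPtr (freq : PySem.Dict Int Int) (keys : List Int) (t : Int)
    (total : Int) (i j : Nat) : Int :=
  if i < j then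
    let s := keys.getD i 0 + keys.getD j 0
    if s < t then pvTwoPtr freq keys t total (i + 1) j
    else if t < s then pvTwoPtr freq keys t total i (j - 1)
    else pvTwoPtr freq keys t
      (total + 2 * PySem.Int.floordiv
        (min (freq.getD (keys.getD i 0) 0) (freq.getD (keys.getD j 0) 0)) 2)
      (i + 1) (j - 1)
  else total
termination_by j - i
decreasing_by all_goals omega

def max_planks_alt (wood : List Int) : Int :=
  let freq := wood.foldl (fun d piece => d.insert piece (d.getD piece 0 + 1)) PySem.Dict.empty
  let keys := PySem.List.sorted freq.keys (fun x => x) false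
  keys.foldl (fun best t =>
    max best (pvTwoPtr freq keys t (freq.getD t 0) 0 (keys.length - 1))) 0

-- ===== PRECONDITION & SPEC =====
def Spec_max_planks (wood : List Int) (out : Int) : Prop := out = max_planks_alt wood
instance (wood : List Int) (out : Int) : Decidable (Spec_max_planks wood out) := by unfold Spec_max_planks; infer_instance

-- ===== CLAIM (what is proved, stated in full; the proofs are below) =====
def Claim_equal_max_planks : Prop := ∀ (wood : List Int), Dom_max_planks wood → Spec_max_planks wood (max_planks wood)

-- ===== LEMMAS AND PROOFS =====

-- the value at index x of the sorted key list
def pvA (ks : List Int) (x : Nat) : Int := ks.getD x 0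

-- the contribution of one unordered pair of indices (floored even part of the min count)
def pvC (d : PySem.Dict Int Int) (ks : List Int) (x y : Nat) : Int :=
  PySem.Int.floordiv (min (d.getD (pvA ks x) 0) (d.getD (pvA ks y) 0)) 2

-- what the two-pointer loop deposits for an index pair (x, y)
def pvG (d : PySem.Dict Int Int) (ks : List Int) (t : Int) (x y : Nat) : Int :=
  if pvA ks x + pvA ks y = t then 2 * pvC d ks x y else 0

-- one direction of A's ordered contribution
def pvG1 (d : PySem.Dict Int Int) (ks : List Int) (t : Int) (x y : Nat) : Int :=
  if pvA ks x + pvA ks y = t then pvC d ks x y else 0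

-- sum of pvG over index pairs i ≤ x < y ≤ j
def pvS (d : PySem.Dict Int Int) (ks : List Int) (t : Int) (i j : Nat) : Int :=
  ((List.range' i (j + 1 - i)).map (fun x =>
    ((List.range' (x + 1) (j - x)).map (pvG d ks t x)).sum)).sum

-- A's per-target body
def pvH (d : PySem.Dict Int Int) (t p : Int) : Int :=
  if d.contains (t - p) && ((t - p) != p) then
    PySem.Int.floordiv (min (d.getD p 0) (d.getD (t - p) 0)) 2
  else 0

def pvGather (d : PySem.Dict Int Int) (t : Int) : Int :=
  d.keys.foldl (fun cur piece =>
    if d.contains (t - piece) && ((t - piece) != piece) then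
      cur + PySem.Int.floordiv (min (d.getD piece 0) (d.getD (t - piece) 0)) 2
    else cur) (d.getD t 0)

lemma pvA_lt {ks : List Int} (hp : ks.Pairwise (· < ·)) {x y : Nat}
    (hxy : x < y) (hy : y < ks.length) : pvA ks x < pvA ks y := by
  have hx : x < ks.length := lt_trans hxy hy
  rw [pvA, pvA, List.getD_eq_getElem _ _ hx, List.getD_eq_getElem _ _ hy]
  exact List.pairwise_iff_getElem.mp hp x y hx hy hxy

lemma pvA_le {ks : List Int} (hp : ks.Pairwise (· < ·)) {x y : Nat}
    (hxy : x ≤ y) (hy : y < ks.length) : pvA ks x ≤ pvA ks y := by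
  rcases Nat.lt_or_ge x y with h | h
  · exact le_of_lt (pvA_lt hp h hy)
  · have : x = y := le_antisymm hxy h
    simp [this]

-- bottom split of the pair sum
lemma pvS_bot (d : PySem.Dict Int Int) (ks : List Int) (t : Int) (i j : Nat) :
    pvS d ks t i j
      = ((List.range' (i + 1) (j - i)).map (pvG d ks t i)).sum + pvS d ks t (i + 1) j := by
  unfold pvS
  rcases Nat.lt_or_ge i (j + 1) with h | h
  · have h1 : j + 1 - i = (j - i) + 1 := by omega
    have h2 : j - i = j + 1 - (i + 1) := by omega
    rw [h1, List.range'_succ, List.map_cons, List.sum_cons, h2]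
  · have h1 : j + 1 - i = 0 := by omega
    have h2 : j - i = 0 := by omega
    have h3 : j + 1 - (i + 1) = 0 := by omega
    simp [h1, h2, h3]

-- top split of the pair sum (for i < j)
lemma pvS_top (d : PySem.Dict Int Int) (ks : List Int) (t : Int) (i j : Nat) (hij : i < j) :
    pvS d ks t i j
      = pvS d ks t i (j - 1) + ((List.range' i (j - i)).map (fun x => pvG d ks t x j)).sum := by
  unfold pvS
  have h1 : j + 1 - i = (j - i) + 1 := by omega
  have h2 : i + 1 * (j - i) = j := by omega
  rw [h1, List.range'_concat, List.map_append, List.sum_append, h2]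
  have hlast : ((List.range' (j + 1) (j - j)).map (pvG d ks t j)).sum = 0 := by
    simp
  rw [List.map_singleton, List.sum_singleton, hlast]
  have hsplit : ∀ x ∈ List.range' i (j - i),
      ((List.range' (x + 1) (j - x)).map (pvG d ks t x)).sum
        = ((List.range' (x + 1) (j - 1 - x)).map (pvG d ks t x)).sum + pvG d ks t x j := by
    intro x hx
    have hxr := List.mem_range'.mp hx
    have hxj : x < j := by omega
    have h3 : j - x = (j - 1 - x) + 1 := by omega
    have h4 : x + 1 + 1 * (j - 1 - x) = j := by omega
    rw [h3, List.range'_concat, List.map_append, List.sum_append, h4,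
        List.map_singleton, List.sum_singleton]
  rw [List.map_congr_left hsplit]
  have h5 : j - 1 + 1 - i = j - i := by omega
  rw [h5]
  have := PySem.List.sum_map_add_int (List.range' i (j - i))
    (fun x => ((List.range' (x + 1) (j - 1 - x)).map (pvG d ks t x)).sum)
    (fun x => pvG d ks t x j)
  simp


-- the two-pointer loop computes total + the pair sum over its window
lemma pvTwoPtr_eq (d : PySem.Dict Int Int) (ks : List Int) (t : Int)
    (hp : ks.Pairwise (· < ·)) :
    ∀ n i j, j - i = n → j < ks.length → ∀ total,
      pvTwoPtr d ks t total i j = total + pvS d ks t i j := by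
  intro n
  induction n using Nat.strong_induction_on with
  | _ n ih =>
    intro i j hn hj total
    rw [pvTwoPtr]
    by_cases hij : i < j
    · rw [if_pos hij]
      by_cases hlt : pvA ks i + pvA ks j < t
      · rw [if_pos (by simpa [pvA] using hlt)]
        rw [ih (j - (i + 1)) (by omega) (i + 1) j rfl hj total]
        have hrow : ((List.range' (i + 1) (j - i)).map (pvG d ks t i)).sum = 0 := by
          apply List.sum_eq_zero
          intro z hz
          simp only [List.mem_map] at hz
          obtain ⟨y, hy, rfl⟩ := hz
          have hyr := List.mem_range'.mp hy
          have h1 : pvA ks y ≤ pvA ks j := pvA_le hp (by omega) hj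
          have : pvA ks i + pvA ks y ≠ t := by omega
          simp [pvG, this]
        rw [pvS_bot d ks t i j, hrow]; ring
      · rw [if_neg (by simpa [pvA] using hlt)]
        by_cases hgt : t < pvA ks i + pvA ks j
        · rw [if_pos (by simpa [pvA] using hgt)]
          rw [ih (j - 1 - i) (by omega) i (j - 1) rfl (by omega) total]
          have hcol : ((List.range' i (j - i)).map (fun x => pvG d ks t x j)).sum = 0 := by
            apply List.sum_eq_zero
            intro z hz
            simp only [List.mem_map] at hz
            obtain ⟨x, hx, rfl⟩ := hz
            have hxr := List.mem_range'.mp hx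
            have h1 : pvA ks i ≤ pvA ks x := pvA_le hp (by omega) (by omega)
            have : pvA ks x + pvA ks j ≠ t := by omega
            simp [pvG, this]
          rw [pvS_top d ks t i j hij, hcol]; ring
        · rw [if_neg (by simpa [pvA] using hgt)]
          have heq : pvA ks i + pvA ks j = t := by omega
          rw [ih (j - 1 - (i + 1)) (by omega) (i + 1) (j - 1) rfl (by omega) _]
          have hcol : ((List.range' i (j - i)).map (fun x => pvG d ks t x j)).sum
              = 2 * pvC d ks i j := by
            have h1 : j - i = (j - i - 1) + 1 := by omega
            rw [h1, List.range'_succ, List.map_cons, List.sum_cons]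
            have hrest : ((List.range' (i + 1) (j - i - 1)).map (fun x => pvG d ks t x j)).sum
                = 0 := by
              apply List.sum_eq_zero
              intro z hz
              simp only [List.mem_map] at hz
              obtain ⟨x, hx, rfl⟩ := hz
              have hxr := List.mem_range'.mp hx
              have hxlt : pvA ks i < pvA ks x := pvA_lt hp (by omega) (by omega)
              have : pvA ks x + pvA ks j ≠ t := by omega
              simp [pvG, this]
            rw [hrest, pvG, if_pos heq]; ring
          have hrow : ((List.range' (i + 1) (j - 1 - i)).map (pvG d ks t i)).sum = 0 := by
            apply List.sum_eq_zero
            intro z hz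
            simp only [List.mem_map] at hz
            obtain ⟨y, hy, rfl⟩ := hz
            have hyr := List.mem_range'.mp hy
            have hylt : pvA ks y < pvA ks j := pvA_lt hp (by omega) hj
            have : pvA ks i + pvA ks y ≠ t := by omega
            simp [pvG, this]
          rw [pvS_top d ks t i j hij, pvS_bot d ks t i (j - 1), hrow, hcol]
          simp only [pvC, pvA]
          ring
    · rw [if_neg hij]
      have : pvS d ks t i j = 0 := by
        unfold pvS
        rcases Nat.lt_or_ge j i with h | h
        · have h1 : j + 1 - i = 0 := by omega
          simp [h1]
        · have h1 : i = j := by omega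
          subst h1
          simp
      rw [this]; ring

-- each pair deposit is the two ordered directions of A's contribution
lemma pvG_eq (d : PySem.Dict Int Int) (ks : List Int) (t : Int) (x y : Nat) :
    pvG d ks t x y = pvG1 d ks t x y + pvG1 d ks t y x := by
  unfold pvG pvG1 pvC
  by_cases h : pvA ks x + pvA ks y = t
  · rw [if_pos h, if_pos h, if_pos (by omega), min_comm]; ring
  · rw [if_neg h, if_neg h, if_neg (by omega)]; ring

lemma pv_map_getD (f : Int → Int) (ks : List Int) :
    ks.map f = (List.range ks.length).map (fun x => f (pvA ks x)) := by
  apply List.ext_getElem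
  · simp
  · intro i h1 h2
    have hi : i < ks.length := by simpa using h1
    simp only [List.getElem_map, List.getElem_range]
    rw [pvA, List.getD_eq_getElem _ _ hi]

lemma pv_sum_delta (k x0 : Nat) (hx : x0 < k) (f : Nat → Int)
    (hf : ∀ y, y < k → y ≠ x0 → f y = 0) :
    ((List.range k).map f).sum = f x0 := by
  induction k with
  | zero => omega
  | succ m ih =>
    rw [List.range_succ, List.map_append, List.sum_append, List.map_singleton,
        List.sum_singleton]
    rcases Nat.lt_or_ge x0 m with h | h
    · rw [ih h (fun y hy hne => hf y (by omega) hne), hf m (by omega) (by omega)]; ring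
    · have hx0 : x0 = m := by omega
      have hz : ((List.range m).map f).sum = 0 := by
        apply List.sum_eq_zero
        intro z hz
        simp only [List.mem_map, List.mem_range] at hz
        obtain ⟨y, hy, rfl⟩ := hz
        exact hf y (by omega) (by omega)
      rw [hz, hx0]; ring

-- index injectivity on a Nodup list, through pvA
lemma pvA_inj {ks : List Int} (hnd : ks.Nodup) {x y : Nat}
    (hx : x < ks.length) (hy : y < ks.length) (h : pvA ks x = pvA ks y) : x = y := by
  rw [pvA, pvA, List.getD_eq_getElem _ _ hx, List.getD_eq_getElem _ _ hy] at h
  exact (List.Nodup.getElem_inj_iff hnd).mp h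

lemma pv_mem_pvA {ks : List Int} {v : Int} (h : v ∈ ks) :
    ∃ y, y < ks.length ∧ pvA ks y = v := by
  obtain ⟨i, hi, he⟩ := List.mem_iff_getElem.mp h
  exact ⟨i, hi, by rw [pvA, List.getD_eq_getElem _ _ hi, he]⟩

-- A's per-key term as a sum over all other indices of the ordered contribution
lemma pv_pointwise (d : PySem.Dict Int Int) (ks : List Int) (t : Int)
    (hnd : ks.Nodup) (hcon : ∀ v : Int, d.contains v = true ↔ v ∈ ks)
    (x : Nat) (hx : x < ks.length) :
    pvH d t (pvA ks x)
      = ((List.range ks.length).map (fun y => if y ≠ x then pvG1 d ks t x y else 0)).sum := by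
  by_cases hc : d.contains (t - pvA ks x) = true
  · by_cases hne : t - pvA ks x = pvA ks x
    · have hH : pvH d t (pvA ks x) = 0 := by
        simp [pvH, bne_eq_false_iff_eq.mpr hne]
      rw [hH]
      symm
      apply List.sum_eq_zero
      intro z hz
      simp only [List.mem_map, List.mem_range] at hz
      obtain ⟨y, hy, rfl⟩ := hz
      by_cases hyx : y = x
      · simp [hyx]
      · rw [if_pos hyx]
        unfold pvG1
        rw [if_neg]
        intro habs
        exact hyx (pvA_inj hnd hy hx (by omega))
    · obtain ⟨y0, hy0k, hy0⟩ := pv_mem_pvA ((hcon _).mp hc)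
      have hy0x : y0 ≠ x := by
        intro h
        rw [h] at hy0
        exact hne hy0.symm
      have hH : pvH d t (pvA ks x)
          = PySem.Int.floordiv (min (d.getD (pvA ks x) 0) (d.getD (t - pvA ks x) 0)) 2 := by
        simp [pvH, hc, bne_iff_ne.mpr hne]
      rw [hH]
      have hdelta : ((List.range ks.length).map
          (fun y => if y ≠ x then pvG1 d ks t x y else 0)).sum
            = if y0 ≠ x then pvG1 d ks t x y0 else 0 := by
        apply pv_sum_delta ks.length y0 hy0k
        intro y hy hyy0
        by_cases hyx : y = x
        · simp [hyx]
        · rw [if_pos hyx]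
          unfold pvG1
          rw [if_neg]
          intro habs
          have : pvA ks y = pvA ks y0 := by omega
          exact hyy0 (pvA_inj hnd hy hy0k this)
      rw [hdelta, if_pos hy0x]
      unfold pvG1
      rw [if_pos (by omega)]
      unfold pvC
      rw [hy0]
  · have hH : pvH d t (pvA ks x) = 0 := by
      simp [pvH, (Bool.not_eq_true _).mp hc]
    rw [hH]
    symm
    apply List.sum_eq_zero
    intro z hz
    simp only [List.mem_map, List.mem_range] at hz
    obtain ⟨y, hy, rfl⟩ := hz
    by_cases hyx : y = x
    · simp [hyx]
    · rw [if_pos hyx]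
      unfold pvG1
      rw [if_neg]
      intro habs
      have hmem : t - pvA ks x ∈ ks := by
        have hpv : pvA ks y = t - pvA ks x := by omega
        rw [← hpv, pvA, List.getD_eq_getElem _ _ hy]
        exact List.getElem_mem hy
      exact hc ((hcon _).mpr hmem)

-- triangle swap: summing below the diagonal equals summing above with swapped roles
lemma pv_swap (f : Nat → Nat → Int) (k : Nat) :
    ((List.range k).map (fun x => ((List.range x).map (fun y => f x y)).sum)).sum
      = ((List.range k).map (fun y =>
          ((List.range' (y + 1) (k - 1 - y)).map (fun x => f x y)).sum)).sum := by
  induction k with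
  | zero => simp
  | succ m ih =>
    rw [List.range_succ]
    simp only [List.map_append, List.sum_append, List.map_singleton, List.sum_singleton]
    have hlast : ((List.range' (m + 1) (m + 1 - 1 - m)).map (fun x => f x m)).sum = 0 := by
      have h0 : m + 1 - 1 - m = 0 := by omega
      rw [h0]
      simp
    have hstep : ∀ y ∈ List.range m,
        ((List.range' (y + 1) (m + 1 - 1 - y)).map (fun x => f x y)).sum
          = ((List.range' (y + 1) (m - 1 - y)).map (fun x => f x y)).sum + f m y := by
      intro y hy
      have hym := List.mem_range.mp hy
      have h1 : m + 1 - 1 - y = (m - 1 - y) + 1 := by omega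
      have h2 : y + 1 + 1 * (m - 1 - y) = m := by omega
      rw [h1, List.range'_concat, List.map_append, List.sum_append, h2,
          List.map_singleton, List.sum_singleton]
    rw [hlast, List.map_congr_left hstep, PySem.List.sum_map_add_int, ih]
    ring

-- drop the diagonal guard by splitting the range at x
lemma pv_split (g : Nat → Int) (x n : Nat) :
    ((List.range (x + 1 + n)).map (fun y => if y ≠ x then g y else 0)).sum
      = ((List.range x).map g).sum + ((List.range' (x + 1) n).map g).sum := by
  have h0 : List.range (x + 1 + n) = (List.range x ++ [x]) ++ List.range' (x + 1) n := by
    rw [List.range_eq_range', ← List.range'_append_1, List.range'_concat, ← List.range_eq_range']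
    simp
  rw [h0]
  simp only [List.map_append, List.sum_append, List.map_singleton, List.sum_singleton]
  rw [if_neg (by omega)]
  have hl : ((List.range x).map (fun y => if y ≠ x then g y else 0)).sum
      = ((List.range x).map g).sum := by
    apply congrArg
    apply List.map_congr_left
    intro y hy
    have := List.mem_range.mp hy
    rw [if_pos (by omega)]
  have hr : ((List.range' (x + 1) n).map (fun y => if y ≠ x then g y else 0)).sum
      = ((List.range' (x + 1) n).map g).sum := by
    apply congrArg
    apply List.map_congr_left
    intro y hy
    have := List.mem_range'.mp hy
    rw [if_pos (by omega)]
  rw [hl, hr]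
  ring

-- total of A's per-key terms = the unordered pair sum the two-pointer loop computes
lemma pv_total (d : PySem.Dict Int Int) (ks : List Int) (t : Int)
    (hnd : ks.Nodup) (hcon : ∀ v : Int, d.contains v = true ↔ v ∈ ks)
    (hk : 0 < ks.length) :
    ((List.range ks.length).map (fun x => pvH d t (pvA ks x))).sum
      = pvS d ks t 0 (ks.length - 1) := by
  have hstep : ∀ x ∈ List.range ks.length,
      pvH d t (pvA ks x)
        = ((List.range x).map (fun y => pvG1 d ks t x y)).sum
          + ((List.range' (x + 1) (ks.length - 1 - x)).map (fun y => pvG1 d ks t x y)).sum := by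
    intro x hx
    have hxk := List.mem_range.mp hx
    rw [pv_pointwise d ks t hnd hcon x hxk]
    have h := pv_split (fun y => pvG1 d ks t x y) x (ks.length - 1 - x)
    have he : x + 1 + (ks.length - 1 - x) = ks.length := by omega
    rw [he] at h
    exact h
  rw [List.map_congr_left hstep, PySem.List.sum_map_add_int,
      pv_swap (fun x y => pvG1 d ks t x y) ks.length, ← PySem.List.sum_map_add_int]
  unfold pvS
  have h1 : ks.length - 1 + 1 - 0 = ks.length := by omega
  rw [h1, ← List.range_eq_range']
  apply congrArg
  apply List.map_congr_left
  intro x hx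
  rw [← PySem.List.sum_map_add_int]
  apply congrArg
  apply List.map_congr_left
  intro y hy
  rw [pvG_eq]
  ring

-- A's inner loop in closed form
lemma pvGather_eq (d : PySem.Dict Int Int) (t : Int) :
    pvGather d t = d.getD t 0 + (d.keys.map (pvH d t)).sum := by
  unfold pvGather
  rw [PySem.List.foldl_congr_mem d.keys _ (fun cur p => cur + pvH d t p) _
    (by
      intro acc p _
      by_cases h : (d.contains (t - p) && ((t - p) != p)) = true
      · simp [pvH, h]
      · simp [pvH, h])]
  exact PySem.List.foldl_add d.keys (pvH d t) _

-- per-target agreement of the two inner loops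
lemma pv_target (d : PySem.Dict Int Int) (ks : List Int) (t : Int)
    (hnd : ks.Nodup) (hp : ks.Pairwise (· < ·))
    (hcon : ∀ v : Int, d.contains v = true ↔ v ∈ ks)
    (hperm : ks.Perm d.keys) (hk : 0 < ks.length) :
    pvTwoPtr d ks t (d.getD t 0) 0 (ks.length - 1) = pvGather d t := by
  rw [pvTwoPtr_eq d ks t hp (ks.length - 1 - 0) 0 (ks.length - 1) rfl (by omega)]
  rw [pvGather_eq]
  congr 1
  rw [← (hperm.map (pvH d t)).sum_eq, pv_map_getD (pvH d t) ks,
      pv_total d ks t hnd hcon hk]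

lemma pv_main (wood : List Int) : max_planks wood = max_planks_alt wood := by
  have hA : max_planks wood
      = (PySem.Dict.counter wood).keys.foldl
          (fun mp t => max mp (pvGather (PySem.Dict.counter wood) t)) 0 := rfl
  have hB : max_planks_alt wood
      = (PySem.List.sorted (PySem.Dict.counter wood).keys (fun x => x) false).foldl
          (fun best t => max best (pvTwoPtr (PySem.Dict.counter wood)
            (PySem.List.sorted (PySem.Dict.counter wood).keys (fun x => x) false) t
            ((PySem.Dict.counter wood).getD t 0) 0
            ((PySem.List.sorted (PySem.Dict.counter wood).keys (fun x => x) false).length - 1))) 0 := rfl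
  set d := PySem.Dict.counter wood with hd
  set ks := PySem.List.sorted d.keys (fun x => x) false with hks
  have hperm : ks.Perm d.keys := PySem.List.sorted_perm d.keys (fun x => x) false
  have hnd : ks.Nodup := (hperm.nodup_iff).mpr (PySem.Dict.nodup_keys_counter wood)
  have hp : ks.Pairwise (· < ·) := by
    rw [hks, hd, PySem.Dict.keys_counter]
    exact PySem.List.sorted_ofList_pairwise_lt wood
  have hcon : ∀ v : Int, d.contains v = true ↔ v ∈ ks := by
    intro v
    rw [PySem.Dict.contains_iff_mem_keys, hperm.mem_iff]
  rw [hA, hB]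
  rw [PySem.List.foldl_congr_mem ks _
    (fun best t => max best (pvGather d t)) 0
    (by
      intro acc t ht
      have hk : 0 < ks.length := List.length_pos_of_mem ht
      rw [pv_target d ks t hnd hp hcon hperm hk])]
  exact (List.Perm.foldl_eq' hperm
    (by
      intro x _ y _ z
      rw [max_assoc, max_assoc, max_comm (pvGather d x)]) 0).symm

-- ===== VERDICT (by name: the statement is the Claim_ definition above) =====
theorem max_planks_spec : Claim_equal_max_planks := by
  intro wood _
  unfold Spec_max_planks
  exact pv_main wood
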